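-- pv_equiv track=rewrite | github.com/endomorphosis/ipfs_accelerate_py | test/generators/runners/end_to_end/enhanced_ci_cd_reports.py | generate_compatibility_matrix
-- ===== SOURCE A (Python) =====
-- from typing import Dict, List, Any, Tuple, Optional, Union, Set, Callable
--
-- def generate_compatibility_matrix(results: Dict[str, Dict[str, Any]]) -> Dict[str, Dict[str, str]]:
--     """
--     Generate a compatibility matrix from test results.
--
--     Args:
--         results: Dictionary with test results by model and hardware
--
--     Returns:
--         Dictionary representing the compatibility matrix
--     """
--     matrix = {}
--
--     # Get all models and hardware platforms
--     all_models = list(results.keys())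
--     all_hardware = set()
--
--     for model, hw_results in results.items():
--         all_hardware.update(hw_results.keys())
--
--     all_hardware = sorted(list(all_hardware))
--
--     # Build the matrix
--     for model in all_models:
--         matrix[model] = {}
--
--         for hw in all_hardware:
--             if hw in results[model]:
--                 status = results[model][hw].get("status", "unknown")
--                 matrix[model][hw] = status
--             else:
--                 matrix[model][hw] = "untested"
--
--     return matrix
-- ===== SOURCE B (Python) =====
-- def generate_compatibility_matrix(results):
--     """Two-pointer merge: each model's entries are sorted by hardware and merged
--     against the sorted hardware axis, emitting 'untested' for the gaps."""
--     all_hw = sorted({hw for r in results.values() for hw in r})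
--     matrix = {}
--     for model, hw_results in results.items():
--         entries = sorted(((hw, v.get("status", "unknown")) for hw, v in hw_results.items()),
--                         key=lambda t: t[0])
--         row = []
--         i = 0
--         for hw in all_hw:
--             if i < len(entries) and entries[i][0] == hw:
--                 row.append((hw, entries[i][1]))
--                 i += 1
--             else:
--                 row.append((hw, "untested"))
--         matrix[model] = dict(row)
--     return matrix
-- ===== Notes on version B (the rewrite author's own statement) =====
-- stated objective: alternative
-- what changed: Each row is produced by a two-pointer merge: the model's entries are pre-mapped to (hardware, status) pairs, sorted by hardware, and merged in one ordered pass against the sorted hardware axis with 'untested' emitted at the gaps, replacing A's per-cell membership test and dict lookup; Pre_ excludes association lists with duplicate keys at the model or hardware level, which represent no Python dict (dict keys are unique) and on which A's first-match lookup vs B's sort order is accidental.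
import Mathlib
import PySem

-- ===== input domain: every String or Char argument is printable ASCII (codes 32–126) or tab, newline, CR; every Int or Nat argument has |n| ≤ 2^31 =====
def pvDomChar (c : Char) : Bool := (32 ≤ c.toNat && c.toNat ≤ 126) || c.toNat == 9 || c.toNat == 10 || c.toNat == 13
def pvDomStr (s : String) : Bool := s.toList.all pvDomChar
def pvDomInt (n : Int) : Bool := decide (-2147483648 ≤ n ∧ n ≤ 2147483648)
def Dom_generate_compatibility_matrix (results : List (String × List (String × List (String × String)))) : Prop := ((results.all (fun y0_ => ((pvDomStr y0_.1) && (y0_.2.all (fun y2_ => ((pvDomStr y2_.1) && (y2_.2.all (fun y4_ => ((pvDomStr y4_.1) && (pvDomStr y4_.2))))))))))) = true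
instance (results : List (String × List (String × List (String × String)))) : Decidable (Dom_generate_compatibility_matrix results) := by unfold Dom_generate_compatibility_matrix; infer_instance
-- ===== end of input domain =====

-- B builds each row by a two-pointer merge of the model's sorted (hardware, status) entries against the sorted hardware axis (alternative: no per-cell membership test or row dict lookup).


-- ===== PORT A =====
def generate_compatibility_matrix (results : List (String × List (String × List (String × String)))) : List (String × List (String × String)) :=
  let all_models := results.map Prod.fst
  let all_hardware : PySem.Set String :=
    results.foldl (fun s p => PySem.Set.update s (p.2.map Prod.fst)) PySem.Set.empty
  let all_hardware := PySem.List.sorted all_hardware (fun x => x) false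
  let matrix := all_models.foldl (fun matrix model =>
      let hw_results := (PySem.Dict.mk results).getD model []
      let row := all_hardware.foldl (fun row hw =>
          if (PySem.Dict.mk hw_results).contains hw then
            row.insert hw ((PySem.Dict.mk ((PySem.Dict.mk hw_results).getD hw [])).getD "status" "unknown")
          else
            row.insert hw "untested")
        (PySem.Dict.empty : PySem.Dict String String)
      matrix.insert model row.items)
    (PySem.Dict.empty : PySem.Dict String (List (String × String)))
  matrix.items

-- ===== PORT B =====
-- the loop 'for hw in all_hw: match entries[i] or emit untested' — structural recursion on the
-- hardware axis, the index i carried as the remaining suffix of entries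
def pvMergeRow : List String → List (String × String) → List (String × String)
  | [], _ => []
  | hw :: hws, [] => (hw, "untested") :: pvMergeRow hws []
  | hw :: hws, (k, v) :: rest =>
      if k == hw then (hw, v) :: pvMergeRow hws rest
      else (hw, "untested") :: pvMergeRow hws ((k, v) :: rest)

def generate_compatibility_matrix_alt (results : List (String × List (String × List (String × String)))) : List (String × List (String × String)) :=
  let all_hw := PySem.List.sorted
    (PySem.Set.ofList (results.flatMap (fun p => p.2.map Prod.fst))) (fun x => x) false
  let matrix := results.foldl (fun matrix p =>
      let entries := PySem.List.sorted
        (p.2.map (fun q => (q.1, (PySem.Dict.mk q.2).getD "status" "unknown"))) Prod.fst false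
      matrix.insert p.1 (PySem.Dict.ofList (pvMergeRow all_hw entries)).items)
    (PySem.Dict.empty : PySem.Dict String (List (String × String)))
  matrix.items

-- ===== PRECONDITION & SPEC =====
-- Pre_ excludes association lists with duplicate keys at the model or hardware level: such lists represent no Python dict (dict keys are unique), and on them A's first-match lookup vs B's sort order is accidental.
def Pre_generate_compatibility_matrix (results : List (String × List (String × List (String × String)))) : Prop :=
  (results.map Prod.fst).Nodup ∧ ∀ p ∈ results, (p.2.map Prod.fst).Nodup
instance (results : List (String × List (String × List (String × String)))) : Decidable (Pre_generate_compatibility_matrix results) := by unfold Pre_generate_compatibility_matrix; infer_instance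
def pvWitness_generate_compatibility_matrix : (List (String × List (String × List (String × String)))) :=
  [("bert", [("cpu", [("status", "pass")])]), ("gpt2", [("cuda", [])])]
def Spec_generate_compatibility_matrix (results : List (String × List (String × List (String × String)))) (out : List (String × List (String × String))) : Prop := out = generate_compatibility_matrix_alt results
instance (results : List (String × List (String × List (String × String)))) (out : List (String × List (String × String))) : Decidable (Spec_generate_compatibility_matrix results out) := by unfold Spec_generate_compatibility_matrix; infer_instance

-- ===== CLAIM (what is proved, stated in full; the proofs are below) =====
def Claim_equal_generate_compatibility_matrix : Prop := ∀ (results : List (String × List (String × List (String × String)))), Dom_generate_compatibility_matrix results → Pre_generate_compatibility_matrix results → Spec_generate_compatibility_matrix results (generate_compatibility_matrix results)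

-- ===== LEMMAS AND PROOFS =====

-- The hardware-union loop of A equals the flattened set comprehension of B.
theorem pv_update_foldl (L : List (String × List (String × List (String × String)))) :
    ∀ s : PySem.Set String,
      L.foldl (fun s p => PySem.Set.update s (p.2.map Prod.fst)) s
        = PySem.Set.update s (L.flatMap (fun p => p.2.map Prod.fst)) := by
  induction L with
  | nil => intro s; simp [PySem.Set.update]
  | cons p rest ih =>
      intro s
      simp only [List.foldl_cons, List.flatMap_cons, ih, PySem.Set.update_append]

theorem pv_hw_sets_eq (results : List (String × List (String × List (String × String)))) :
    results.foldl (fun s p => PySem.Set.update s (p.2.map Prod.fst)) PySem.Set.empty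
      = PySem.Set.ofList (results.flatMap (fun p => p.2.map Prod.fst)) := by
  rw [pv_update_foldl]
  simp [PySem.Set.empty, PySem.Set.update_nil_left]

-- first-match lookup of a raw association list as find?
theorem pv_get?_eq_find? {β : Type} (l : List (String × β)) (k : String) :
    (PySem.Dict.mk l).get? k = (l.find? (fun q => q.1 == k)).map Prod.snd := by
  induction l with
  | nil => rfl
  | cons q rest ih =>
      rw [PySem.Dict.get?_mk_cons]
      by_cases h : q.1 = k
      · simp [h]
      · have h' : (q.1 == k) = false := by simp [h]
        simp [h', ih]

-- with unique keys, find? is invariant under permutation (at most one element matches)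
theorem pv_find?_perm {β : Type} (l l' : List (String × β)) (h : l.Perm l')
    (hn : (l.map Prod.fst).Nodup) (k : String) :
    l.find? (fun q => q.1 == k) = l'.find? (fun q => q.1 == k) := by
  rw [← List.head?_filter, ← List.head?_filter]
  have hp := h.filter (fun q => q.1 == k)
  cases hfl : l.filter (fun q => q.1 == k) with
  | nil =>
      rw [hfl] at hp
      rw [hp.symm.eq_nil]
  | cons a t =>
      cases t with
      | nil => rw [hfl] at hp; rw [(List.perm_singleton.mp hp.symm)]
      | cons b t' =>
          exfalso
          have hnf : ((l.filter (fun q => q.1 == k)).map Prod.fst).Nodup :=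
            (List.filter_sublist.map Prod.fst).nodup hn
          rw [hfl] at hnf
          have ha : a ∈ l.filter (fun q => q.1 == k) := by rw [hfl]; simp
          have hb : b ∈ l.filter (fun q => q.1 == k) := by rw [hfl]; simp
          have hak : a.1 = k := by simpa using (List.mem_filter.mp ha).2
          have hbk : b.1 = k := by simpa using (List.mem_filter.mp hb).2
          simp [hak, hbk] at hnf

-- the two-pointer merge, characterised entrywise on sorted inputs
theorem pv_merge_eq (hws : List String) :
    ∀ entries : List (String × String),
      hws.Pairwise (· < ·) → entries.Pairwise (fun a b => a.1 < b.1) →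
      (∀ q ∈ entries, q.1 ∈ hws) →
      pvMergeRow hws entries
        = hws.map (fun hw => (hw, ((entries.find? (fun q => q.1 == hw)).map Prod.snd).getD "untested")) := by
  induction hws with
  | nil => intro entries _ _ _; rfl
  | cons hw hws ih =>
      intro entries hphw hpe hsub
      have hlt : ∀ y ∈ hws, hw < y := (List.pairwise_cons.mp hphw).1
      have hphw' := (List.pairwise_cons.mp hphw).2
      cases entries with
      | nil =>
          simp only [pvMergeRow, List.find?_nil, Option.map_none, Option.getD_none, List.map_cons]
          rw [ih [] hphw' (by simp) (by simp)]
          simp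
      | cons q rest =>
          obtain ⟨k, v⟩ := q
          have hpe' := (List.pairwise_cons.mp hpe).2
          have hrest_gt : ∀ r ∈ rest, k < r.1 := fun r hr => (List.pairwise_cons.mp hpe).1 r hr
          by_cases hk : k = hw
          · have hkb : (k == hw) = true := by simp [hk]
            have hsub' : ∀ r ∈ rest, r.1 ∈ hws := by
              intro r hr
              have h1 : r.1 ∈ hw :: hws := hsub r (by simp [hr])
              have h2 : hw < r.1 := hk ▸ hrest_gt r hr
              rcases List.mem_cons.mp h1 with h | h
              · exact absurd h.symm (ne_of_lt h2)
              · exact h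
            have hhead : ((k, v) :: rest).find? (fun q => q.1 == hw) = some (k, v) := by
              simp [hkb]
            simp only [pvMergeRow, hkb, if_true, List.map_cons, hhead, Option.map_some,
              Option.getD_some]
            refine congrArg (List.cons (hw, v)) ?_
            rw [ih rest hphw' hpe' hsub']
            apply List.map_congr_left
            intro y hy
            have hky : (k == y) = false := by
              have : hw < y := hlt y hy
              simp [hk, ne_of_lt this]
            simp [hky]
          · have hkb : (k == hw) = false := by simp [hk]
            have hkmem : k ∈ hws := by
              have h1 : k ∈ hw :: hws := hsub (k, v) (by simp)
              rcases List.mem_cons.mp h1 with h | h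
              · exact absurd h hk
              · exact h
            have hwk : hw < k := hlt k hkmem
            have hsub' : ∀ r ∈ (k, v) :: rest, r.1 ∈ hws := by
              intro r hr
              rcases List.mem_cons.mp hr with h | h
              · rw [h]; exact hkmem
              · have h1 : r.1 ∈ hw :: hws := hsub r (by simp [h])
                have h2 : hw < r.1 := lt_trans hwk (hrest_gt r h)
                rcases List.mem_cons.mp h1 with h' | h'
                · exact absurd h'.symm (ne_of_lt h2)
                · exact h'
            have hnone : ((k, v) :: rest).find? (fun q => q.1 == hw) = none := by
              rw [List.find?_eq_none]
              intro r hr hrk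
              have hr1 : r.1 = hw := by simpa using hrk
              rcases List.mem_cons.mp hr with h | h
              · rw [h] at hr1; exact hk hr1
              · exact absurd hr1.symm (ne_of_lt (lt_trans hwk (hrest_gt r h)))
            simp only [pvMergeRow, hkb, List.map_cons, hnone, Option.map_none,
              Option.getD_none]
            exact congrArg (List.cons (hw, "untested")) (ih ((k, v) :: rest) hphw' hpe hsub')

-- the per-model row of A equals the per-model merged row of B
theorem pv_row_eq (hws : List String) (inner : List (String × List (String × String)))
    (hp : hws.Pairwise (· < ·)) (hin : (inner.map Prod.fst).Nodup)
    (hsub : ∀ q ∈ inner, q.1 ∈ hws) :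
    (hws.foldl (fun row hw =>
        if (PySem.Dict.mk inner).contains hw then
          row.insert hw ((PySem.Dict.mk ((PySem.Dict.mk inner).getD hw [])).getD "status" "unknown")
        else
          row.insert hw "untested")
      (PySem.Dict.empty : PySem.Dict String String)).items
    = (PySem.Dict.ofList (pvMergeRow hws
        (PySem.List.sorted (inner.map (fun q => (q.1, (PySem.Dict.mk q.2).getD "status" "unknown"))) Prod.fst false))).items := by
  have hn : hws.Nodup := hp.imp ne_of_lt
  -- A's row as a map over the sorted hardware axis
  have hfun : (fun (row : PySem.Dict String String) hw =>
      if (PySem.Dict.mk inner).contains hw then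
        row.insert hw ((PySem.Dict.mk ((PySem.Dict.mk inner).getD hw [])).getD "status" "unknown")
      else row.insert hw "untested")
    = fun (row : PySem.Dict String String) hw => row.insert hw
        (if (PySem.Dict.mk inner).contains hw then
          ((PySem.Dict.mk ((PySem.Dict.mk inner).getD hw [])).getD "status" "unknown")
        else "untested") := by
    funext row hw; by_cases h : (PySem.Dict.mk inner).contains hw <;> simp [h]
  have hA := PySem.Dict.items_foldl_insert_fresh hws (fun hw => hw)
      (fun hw => if (PySem.Dict.mk inner).contains hw then
          ((PySem.Dict.mk ((PySem.Dict.mk inner).getD hw [])).getD "status" "unknown")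
        else "untested")
      (PySem.Dict.empty : PySem.Dict String String)
      (by intro a _; simp) (by simpa using hn)
  rw [hfun, hA]
  have he0 : (PySem.Dict.empty : PySem.Dict String String).items = [] := rfl
  rw [he0, List.nil_append]
  -- entries: the sorted per-model pairs
  set f : (String × List (String × String)) → String × String :=
    fun q => (q.1, (PySem.Dict.mk q.2).getD "status" "unknown") with hf
  set entries := PySem.List.sorted (inner.map f) Prod.fst false with he
  have hperm : entries.Perm (inner.map f) := PySem.List.sorted_perm _ _ _
  have hkeys : (inner.map f).map Prod.fst = inner.map Prod.fst := by
    rw [List.map_map]; rfl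
  have hnE : (entries.map Prod.fst).Nodup := by
    have := (hperm.map Prod.fst).nodup_iff.mpr (hkeys ▸ hin)
    exact this
  have hpe : entries.Pairwise (fun a b => a.1 < b.1) := by
    have hle : entries.Pairwise (fun a b => a.1 ≤ b.1) := PySem.List.sorted_pairwise _ _
    have hne : entries.Pairwise (fun a b => a.1 ≠ b.1) := List.pairwise_map.mp hnE
    exact (hle.and hne).imp (fun h => lt_of_le_of_ne h.1 h.2)
  have hsubE : ∀ q ∈ entries, q.1 ∈ hws := by
    intro q hq
    have : q ∈ inner.map f := by rwa [he, PySem.List.mem_sorted] at hq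
    obtain ⟨r, hr, hrq⟩ := List.mem_map.mp this
    have : q.1 = r.1 := by rw [← hrq]
    rw [this]; exact hsub r hr
  rw [pv_merge_eq hws entries hp hpe hsubE]
  -- Dict.ofList of a Nodup-keyed list keeps the list as items
  have hofList : ∀ L : List (String × String), (L.map Prod.fst).Nodup →
      (PySem.Dict.ofList L).items = L := by
    intro L hL
    have : (PySem.Dict.ofList L) = L.foldl (fun d p => d.insert p.1 p.2) PySem.Dict.empty := rfl
    rw [this]
    rw [PySem.Dict.items_foldl_insert_fresh L Prod.fst Prod.snd
        (PySem.Dict.empty : PySem.Dict String String) (by intro a _; simp) hL]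
    have he0 : (PySem.Dict.empty : PySem.Dict String String).items = [] := rfl
    simp [he0]
  rw [hofList _ (by simpa [List.map_map, Function.comp_def] using hn)]
  -- pointwise equality of the two maps over hws
  apply List.map_congr_left
  intro hw _
  have hfind : entries.find? (fun q => q.1 == hw) = ((inner.find? (fun q => q.1 == hw)).map f) := by
    rw [pv_find?_perm entries (inner.map f) hperm hnE hw]
    exact List.find?_map
  rw [hfind]
  cases hif : inner.find? (fun q => q.1 == hw) with
  | none =>
      have hg : (PySem.Dict.mk inner).get? hw = none := by rw [pv_get?_eq_find?, hif]; rfl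
      have hc : (PySem.Dict.mk inner).contains hw = false := by
        rw [PySem.Dict.contains_eq_isSome_get?, hg]; rfl
      simp [hc]
  | some r =>
      have hg : (PySem.Dict.mk inner).get? hw = some r.2 := by rw [pv_get?_eq_find?, hif]; rfl
      have hc : (PySem.Dict.mk inner).contains hw = true := by
        rw [PySem.Dict.contains_eq_isSome_get?, hg]; rfl
      have hgd : (PySem.Dict.mk inner).getD hw [] = r.2 :=
        PySem.Dict.getD_of_get?_eq_some _ _ hg
      simp [hc, hgd, hf]

-- ===== VERDICT (by name: the statement is the Claim_ definition above) =====
theorem generate_compatibility_matrix_spec : Claim_equal_generate_compatibility_matrix := by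
  intro results _hdom hpre
  unfold Spec_generate_compatibility_matrix
  unfold generate_compatibility_matrix generate_compatibility_matrix_alt
  simp only [pv_hw_sets_eq]
  rw [PySem.Dict.items_foldl_insert_fresh (results.map Prod.fst) (fun model => model) _
      (PySem.Dict.empty : PySem.Dict String (List (String × String)))
      (by intro a _; simp) (by simpa using hpre.1)]
  rw [PySem.Dict.items_foldl_insert_fresh results Prod.fst _
      (PySem.Dict.empty : PySem.Dict String (List (String × String)))
      (by intro a _; simp) hpre.1]
  simp only [List.map_map]
  apply List.map_congr_left
  intro p hp
  have hget : (PySem.Dict.mk results).get? p.1 = some p.2 :=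
    PySem.Dict.get?_of_mem_items (PySem.Dict.mk results) (by simpa using hp) (by simpa using hpre.1)
  have hgd : (PySem.Dict.mk results).getD p.1 [] = p.2 := PySem.Dict.getD_of_get?_eq_some _ _ hget
  simp only [Function.comp_apply]
  rw [hgd]
  have hrow := pv_row_eq
    (PySem.List.sorted (PySem.Set.ofList (results.flatMap fun p => p.2.map Prod.fst)) (fun x => x) false)
    p.2
    (PySem.List.sorted_ofList_pairwise_lt _)
    (hpre.2 p hp)
    (by
      intro q hq
      rw [PySem.List.mem_sorted, PySem.Set.mem_ofList]
      exact List.mem_flatMap.mpr ⟨p, hp, List.mem_map_of_mem hq⟩)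
  rw [hrow]
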